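-- pv_equiv track=rewrite | github.com/ericbgarnick/AOC | 2019/repeat/day04/src.py | has_paired_digit
-- ===== SOURCE A (Python) =====
-- def has_paired_digit(value: str) -> bool:
--     """Return True if any digit appears exactly twice in a row.
--     Otherwise return False."""
--     i = 0
--     while i < len(value) - 1:
--         j = i + 1
--         while j < len(value) and value[i] == value[j]:
--             j += 1
--         if j - i == 2:
--             return True
--         i = j
--
--     return False
-- ===== SOURCE B (Python) =====
-- def has_paired_digit(value: str) -> bool:
--     """Return True if any digit appears exactly twice in a row.
--     Otherwise return False."""
--     n = len(value)
--     for i in range(n - 1):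
--         if (value[i] == value[i + 1]
--                 and (i == 0 or value[i - 1] != value[i])
--                 and (i + 2 >= n or value[i + 2] != value[i])):
--             return True
--     return False
-- ===== Notes on version B (the rewrite author's own statement) =====
-- stated objective: alternative
-- what changed: B scans each adjacent index pair once and tests a 4-character window (pair equal, left neighbor absent/different, right neighbor absent/different) instead of A's nested while-loops that group maximal runs and test each run's length for exactly 2.
import Mathlib
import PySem

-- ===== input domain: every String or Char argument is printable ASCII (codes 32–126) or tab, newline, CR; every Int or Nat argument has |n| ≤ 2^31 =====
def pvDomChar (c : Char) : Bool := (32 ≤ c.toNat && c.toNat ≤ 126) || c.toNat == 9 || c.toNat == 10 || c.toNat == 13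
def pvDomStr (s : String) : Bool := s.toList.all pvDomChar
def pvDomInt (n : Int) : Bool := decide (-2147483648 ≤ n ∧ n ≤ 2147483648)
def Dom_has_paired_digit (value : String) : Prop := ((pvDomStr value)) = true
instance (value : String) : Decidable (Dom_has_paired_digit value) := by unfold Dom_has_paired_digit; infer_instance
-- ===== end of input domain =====

-- B replaces A's nested run-grouping while-loops by a single index scan that tests
-- each adjacent pair together with its two boundary neighbours (alternative decomposition,
-- same cost).  All indexing is in range, so List.getElem? is exact for Python's value[i].

-- ===== PORT A =====
-- inner while loop: 'while j < len(value) and value[i] == value[j]: j += 1'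
def pvInnerA (s : List Char) (i j : Nat) : Nat :=
  if h : j < s.length ∧ s[i]? = s[j]? then pvInnerA s i (j + 1) else j
termination_by s.length - j
decreasing_by omega

-- needed by the outer loop's termination proof (j strictly advances past i)
theorem pvInnerA_ge (s : List Char) (i j : Nat) : j ≤ pvInnerA s i j := by
  fun_induction pvInnerA with
  | case1 j h ih => omega
  | case2 j h => omega

-- outer while loop: 'while i < len(value) - 1: …'
def pvOuterA (s : List Char) (i : Nat) : Bool :=
  if h : i + 1 < s.length then
    let j := pvInnerA s i (i + 1)
    if j - i = 2 then true else pvOuterA s j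
  else false
termination_by s.length - i
decreasing_by
  have := pvInnerA_ge s i (i + 1)
  omega

def has_paired_digit (value : String) : Bool := pvOuterA value.toList 0

-- ===== PORT B =====
-- single for-loop over i in range(len(value) - 1)
def pvLoopB (s : List Char) (i : Nat) : Bool :=
  if i + 1 < s.length then
    if (s[i]? == s[i + 1]?)
        && (i == 0 || !(s[i - 1]? == s[i]?))
        && (decide (s.length ≤ i + 2) || !(s[i + 2]? == s[i]?)) then true
    else pvLoopB s (i + 1)
  else false
termination_by s.length - i

def has_paired_digit_alt (value : String) : Bool := pvLoopB value.toList 0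

-- ===== PRECONDITION & SPEC =====
def Spec_has_paired_digit (value : String) (out : Bool) : Prop := out = has_paired_digit_alt value
instance (value : String) (out : Bool) : Decidable (Spec_has_paired_digit value out) := by unfold Spec_has_paired_digit; infer_instance

-- ===== CLAIM (what is proved, stated in full; the proofs are below) =====
def Claim_equal_has_paired_digit : Prop := ∀ (value : String), Dom_has_paired_digit value → Spec_has_paired_digit value (has_paired_digit value)

-- ===== LEMMAS AND PROOFS =====

-- "position i is an isolated pair": the common specification both loops detect
def pvP (s : List Char) (i : Nat) : Prop :=
  i + 1 < s.length ∧ s[i]? = s[i + 1]? ∧ (i = 0 ∨ s[i - 1]? ≠ s[i]?) ∧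
    (s.length ≤ i + 2 ∨ s[i + 2]? ≠ s[i]?)

-- B's loop returns true iff some isolated pair lies at an index ≥ k
theorem pvLoopB_iff (s : List Char) (k : Nat) :
    pvLoopB s k = true ↔ ∃ m, k ≤ m ∧ pvP s m := by
  fun_induction pvLoopB with
  | case1 k h hc =>
    simp only [Bool.and_eq_true, Bool.or_eq_true, beq_iff_eq, Bool.not_eq_true',
      decide_eq_true_eq, beq_eq_false_iff_ne] at hc
    obtain ⟨⟨hc1, hc2⟩, hc3⟩ := hc
    constructor
    · intro _; exact ⟨k, le_refl _, h, hc1, hc2, hc3⟩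
    · intro _; rfl
  | case2 k h hc ih =>
    rw [ih]
    constructor
    · rintro ⟨m, hm, hp⟩; exact ⟨m, by omega, hp⟩
    · rintro ⟨m, hm, hp⟩
      refine ⟨m, ?_, hp⟩
      rcases Nat.eq_or_lt_of_le hm with rfl | h1
      · exfalso
        apply hc
        simp only [Bool.and_eq_true, Bool.or_eq_true, beq_iff_eq, Bool.not_eq_true',
          decide_eq_true_eq, beq_eq_false_iff_ne]
        exact ⟨⟨hp.2.1, hp.2.2.1⟩, hp.2.2.2⟩
      · omega
  | case3 k h =>
    constructor
    · intro hf; exact absurd hf (by simp)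
    · rintro ⟨m, hm, hp⟩; exfalso; have := hp.1; omega

-- full characterisation of the inner while loop
theorem pvInnerA_spec (s : List Char) (i j : Nat) (hj : j ≤ s.length) :
    pvInnerA s i j ≤ s.length ∧
    (∀ m, j ≤ m → m < pvInnerA s i j → s[m]? = s[i]?) ∧
    (pvInnerA s i j < s.length → s[pvInnerA s i j]? ≠ s[i]?) := by
  fun_induction pvInnerA with
  | case1 j h ih =>
    obtain ⟨h1, h2, h3⟩ := ih (by omega)
    refine ⟨h1, ?_, h3⟩
    intro m hm hm'
    rcases Nat.eq_or_lt_of_le hm with rfl | hlt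
    · exact h.2.symm
    · exact h2 m (by omega) hm'
  | case2 j h =>
    refine ⟨hj, by omega, ?_⟩
    intro hlt
    rcases not_and_or.mp h with h1 | h1
    · omega
    · exact fun hc => h1 hc.symm

def pvRunStart (s : List Char) (i : Nat) : Prop := i = 0 ∨ s[i - 1]? ≠ s[i]?

-- A's outer loop, applied at a run start, returns true iff some isolated pair lies at an index ≥ i
theorem pvOuterA_iff (s : List Char) (i : Nat) (hrs : pvRunStart s i) :
    pvOuterA s i = true ↔ ∃ m, i ≤ m ∧ pvP s m := by
  fun_induction pvOuterA with
  | case1 i h j =>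
    rename_i hj2
    -- hj2 : j - i = 2, the run starting at i has length exactly 2
    have hjdef : j = pvInnerA s i (i + 1) := rfl
    clear_value j
    obtain ⟨h1, h2, h3⟩ := pvInnerA_spec s i (i + 1) (by omega)
    have hge := pvInnerA_ge s i (i + 1)
    rw [← hjdef] at h1 h2 h3 hge
    constructor
    · intro _
      refine ⟨i, le_refl _, h, (h2 (i + 1) (le_refl _) (by omega)).symm, hrs, ?_⟩
      rcases Nat.lt_or_ge j s.length with hl | hl
      · right; have h4 := h3 hl; rw [(by omega : i + 2 = j)]; exact h4
      · left; omega
    · intro _; rfl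
  | case2 i h j hne ih =>
    have hjdef : j = pvInnerA s i (i + 1) := rfl
    clear_value j
    obtain ⟨h1, h2, h3⟩ := pvInnerA_spec s i (i + 1) (by omega)
    have hge := pvInnerA_ge s i (i + 1)
    rw [← hjdef] at h1 h2 h3 hge
    -- j is itself a run start
    have hrsJ : pvRunStart s j := by
      right
      rcases Nat.lt_or_ge j s.length with hl | hl
      · have heq : s[j - 1]? = s[i]? := by
          rcases Nat.eq_or_lt_of_le hge with hh | hh
          · rw [(by omega : j - 1 = i)]
          · exact h2 (j - 1) (by omega) (by omega)
        rw [heq]; exact fun hc => h3 hl hc.symm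
      · -- j = s.length: s[j]? is none while s[j-1]? is not
        intro hcontra
        rw [List.getElem?_eq_getElem (by omega : j - 1 < s.length),
          List.getElem?_eq_none (by omega)] at hcontra
        simp at hcontra
    rw [ih hrsJ]
    constructor
    · rintro ⟨m, hm, hp⟩; exact ⟨m, by omega, hp⟩
    · rintro ⟨m, hm, hp⟩
      refine ⟨m, ?_, hp⟩
      rcases Nat.lt_or_ge m j with hlt | hje
      swap
      · exact hje
      exfalso
      rcases Nat.eq_or_lt_of_le hm with rfl | him
      · -- m = i: pvP s i forces j = i + 2, contradicting hne
        have he2 : i + 1 < j := by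
          rcases Nat.lt_or_ge (i + 1) j with hh | hh
          · exact hh
          · exfalso
            have h4 := h3 (by omega)
            rw [(by omega : j = i + 1)] at h4
            exact h4 hp.2.1.symm
        have he3 : j ≤ i + 2 := by
          rcases hp.2.2.2 with hl | hl
          · omega
          · rcases Nat.lt_or_ge (i + 2) j with hh | hh
            · exact absurd (h2 (i + 2) (by omega) hh) hl
            · exact hh
        omega
      · -- i < m < j: s[m-1]? = s[m]? = s[i]?, contradicting pvP's left condition
        have hmv : s[m]? = s[i]? := h2 m (by omega) (by omega)
        have hm1 : s[m - 1]? = s[i]? := by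
          rcases Nat.eq_or_lt_of_le him with hh | hh
          · rw [(by omega : m - 1 = i)]
          · exact h2 (m - 1) (by omega) (by omega)
        rcases hp.2.2.1 with h0 | h0
        · omega
        · exact h0 (hm1.trans hmv.symm)
  | case3 i h =>
    constructor
    · intro hf; exact absurd hf (by simp)
    · rintro ⟨m, hm, hp⟩; exfalso; have := hp.1; omega

-- ===== VERDICT (by name: the statement is the Claim_ definition above) =====
theorem has_paired_digit_spec : Claim_equal_has_paired_digit := by
  intro value _
  unfold Spec_has_paired_digit has_paired_digit has_paired_digit_alt
  rw [Bool.eq_iff_iff, pvOuterA_iff value.toList 0 (Or.inl rfl), pvLoopB_iff]
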